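-- pv_equiv track=rewrite | github.com/lysergamide/Advent-of-Code | 2016/13.py | isOpen
-- ===== SOURCE A (Python) =====
-- def isOpen(x: int, y: int, magic: int) -> bool:
--     # fast bit count from Hacker's Delight
--     def countBits(x: int) -> int:
--         ret = 0
--         while x > 0:
--             ret += 1
--             x &= x - 1
--
--         return ret
--
--     return countBits(magic + (x*x + 3*x + 2*x*y + y + y*y)) % 2 == 0
-- ===== SOURCE B (Python) =====
-- def isOpen(x: int, y: int, magic: int) -> bool:
--     n = magic + (x*x + 3*x + 2*x*y + y + y*y)
--     parity = 0
--     while n > 0: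
--         parity ^= n & 1
--         n >>= 1
--     return parity == 0
-- ===== Notes on version B (the rewrite author's own statement) =====
-- stated objective: alternative
-- what changed: B folds a single parity bit over all bit positions of n (parity ^= n & 1; n >>= 1) instead of A's Kernighan loop that clears the lowest set bit (x &= x-1) while counting all set bits and taking the count mod 2.
import Mathlib
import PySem

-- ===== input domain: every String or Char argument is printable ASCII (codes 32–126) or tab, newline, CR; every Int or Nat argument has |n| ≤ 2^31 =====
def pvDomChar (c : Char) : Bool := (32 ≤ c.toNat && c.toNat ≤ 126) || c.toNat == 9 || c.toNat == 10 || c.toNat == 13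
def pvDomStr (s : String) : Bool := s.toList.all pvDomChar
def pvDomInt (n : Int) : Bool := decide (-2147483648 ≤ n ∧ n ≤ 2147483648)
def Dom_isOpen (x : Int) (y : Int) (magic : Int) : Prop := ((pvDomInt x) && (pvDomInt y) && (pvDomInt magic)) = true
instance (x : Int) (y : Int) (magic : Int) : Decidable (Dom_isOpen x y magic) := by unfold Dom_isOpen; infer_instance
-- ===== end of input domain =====

-- B replaces A's Kernighan clear-lowest-set-bit counting loop by a single-parity-bit
-- fold over all bit positions (alternative decomposition; same result, similar cost).

-- ===== PORT A =====
-- termination helper for A's `while x > 0: x &= x - 1` loop (cited by decreasing_by)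
theorem pvLandDec (x : Int) (h : 0 < x) : (Int.land x (x - 1)).toNat < x.toNat := by
  obtain ⟨m, rfl⟩ : ∃ m : Nat, x = (m : Int) := ⟨x.toNat, by omega⟩
  have hm : 0 < m := by exact_mod_cast h
  have h1 : (m : Int) - 1 = ((m - 1 : Nat) : Int) := by omega
  rw [h1]
  have : Int.land (m : Int) ((m - 1 : Nat) : Int) = ((m &&& (m - 1) : Nat) : Int) := rfl
  rw [this]
  have h2 : m &&& (m - 1) ≤ m - 1 := Nat.and_le_right
  have h3 : ((m &&& (m - 1) : Nat) : Int).toNat = m &&& (m - 1) := Int.toNat_natCast _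
  have h4 : ((m : Nat) : Int).toNat = m := Int.toNat_natCast _
  omega

-- `while x > 0: ret += 1; x &= x - 1` of A's inner countBits
def pvCountBits (x : Int) (ret : Int) : Int :=
  if h : 0 < x then pvCountBits (Int.land x (x - 1)) (ret + 1) else ret
termination_by x.toNat
decreasing_by exact pvLandDec x h

-- port of A: countBits(magic + (x*x + 3*x + 2*x*y + y + y*y)) % 2 == 0
def isOpen (x : Int) (y : Int) (magic : Int) : Bool :=
  PySem.Int.mod (pvCountBits (magic + (x*x + 3*x + 2*x*y + y + y*y)) 0) 2 == 0

-- ===== PORT B =====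
-- termination helper for B's `while n > 0: n >>= 1` loop (cited by decreasing_by)
theorem pvShiftDec (n : Int) (h : 0 < n) : (Int.shiftRight n 1).toNat < n.toNat := by
  obtain ⟨m, rfl⟩ : ∃ m : Nat, n = (m : Int) := ⟨n.toNat, by omega⟩
  have hm : 0 < m := by exact_mod_cast h
  have : Int.shiftRight (m : Int) 1 = ((m >>> 1 : Nat) : Int) := rfl
  rw [this]
  simp [Nat.shiftRight_succ]
  omega

-- `while n > 0: parity ^= n & 1; n >>= 1` of B
def pvParityLoop (n : Int) (parity : Int) : Int :=
  if h : 0 < n then pvParityLoop (Int.shiftRight n 1) (Int.xor parity (Int.land n 1)) else parity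
termination_by n.toNat
decreasing_by exact pvShiftDec n h

-- port of B: fold the parity bit, then compare with 0
def isOpen_alt (x : Int) (y : Int) (magic : Int) : Bool :=
  pvParityLoop (magic + (x*x + 3*x + 2*x*y + y + y*y)) 0 == 0

-- ===== PRECONDITION & SPEC =====
def Spec_isOpen (x : Int) (y : Int) (magic : Int) (out : Bool) : Prop := out = isOpen_alt x y magic
instance (x : Int) (y : Int) (magic : Int) (out : Bool) : Decidable (Spec_isOpen x y magic out) := by unfold Spec_isOpen; infer_instance

-- ===== CLAIM (what is proved, stated in full; the proofs are below) =====
def Claim_equal_isOpen : Prop := ∀ (x : Int) (y : Int) (magic : Int), Dom_isOpen x y magic → Spec_isOpen x y magic (isOpen x y magic)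

-- ===== LEMMAS AND PROOFS =====

-- number of set bits, the common specification both loops are related to
def pvPopc (n : Nat) : Nat :=
  if n = 0 then 0 else n % 2 + pvPopc (n / 2)
termination_by n
decreasing_by omega

theorem pvPopc_two_mul (k : Nat) : pvPopc (2 * k) = pvPopc k := by
  rcases Nat.eq_zero_or_pos k with rfl | hk
  · rfl
  · rw [pvPopc]
    have h1 : 2 * k % 2 = 0 := by omega
    have h2 : 2 * k / 2 = k := by omega
    simp [h1, h2]
    omega

theorem pvPopc_two_mul_add_one (k : Nat) : pvPopc (2 * k + 1) = pvPopc k + 1 := by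
  rw [pvPopc]
  have h1 : (2 * k + 1) % 2 = 1 := by omega
  have h2 : (2 * k + 1) / 2 = k := by omega
  simp [h1, h2]
  omega

theorem pvLand_odd_even (k : Nat) : (2 * k + 1) &&& (2 * k) = 2 * k := by
  apply Nat.eq_of_testBit_eq
  intro i
  cases i with
  | zero =>
      rw [Nat.testBit_and]
      simp only [Nat.testBit_zero]
      have h1 : (2 * k + 1) % 2 = 1 := by omega
      have h2 : 2 * k % 2 = 0 := by omega
      simp [h1, h2]
  | succ i =>
      rw [Nat.testBit_and]
      simp only [Nat.testBit_succ]
      have h1 : (2 * k + 1) / 2 = k := by omega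
      have h2 : 2 * k / 2 = k := by omega
      simp [h1, h2]

theorem pvLand_even_odd (k j : Nat) : (2 * k) &&& (2 * j + 1) = 2 * (k &&& j) := by
  apply Nat.eq_of_testBit_eq
  intro i
  cases i with
  | zero =>
      rw [Nat.testBit_and]
      simp only [Nat.testBit_zero]
      have h1 : 2 * k % 2 = 0 := by omega
      have h2 : 2 * (k &&& j) % 2 = 0 := by omega
      simp [h1, h2]
  | succ i =>
      rw [Nat.testBit_and]
      simp only [Nat.testBit_succ]
      have h1 : 2 * k / 2 = k := by omega
      have h2 : (2 * j + 1) / 2 = j := by omega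
      have h3 : 2 * (k &&& j) / 2 = k &&& j := by omega
      rw [h1, h2, h3, Nat.testBit_and]

-- Kernighan: clearing the lowest set bit removes exactly one set bit
theorem pvKernighan : ∀ m : Nat, 0 < m → pvPopc (m &&& (m - 1)) + 1 = pvPopc m := by
  intro m
  induction m using Nat.strong_induction_on with
  | _ m ih =>
    intro hm
    rcases Nat.even_or_odd m with ⟨k, hk⟩ | ⟨k, hk⟩
    · -- m = 2k with k > 0; m - 1 = 2(k-1) + 1
      have hk' : 0 < k := by omega
      have h1 : m = 2 * k := by omega
      have h2 : m - 1 = 2 * (k - 1) + 1 := by omega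
      rw [h2, h1, pvLand_even_odd, pvPopc_two_mul, pvPopc_two_mul]
      exact ih k (by omega) hk'
    · -- m = 2k + 1; m - 1 = 2k
      have h1 : m = 2 * k + 1 := by omega
      have h2 : m - 1 = 2 * k := by omega
      rw [h2, h1, pvLand_odd_even, pvPopc_two_mul, pvPopc_two_mul_add_one]

-- A's loop adds the number of set bits of n (0 for n ≤ 0) to the accumulator
theorem pvCountBits_eq_aux : ∀ (N : Nat) (n r : Int), n.toNat ≤ N →
    pvCountBits n r = r + ((pvPopc n.toNat : Nat) : Int) := by
  intro N
  induction N with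
  | zero =>
      intro n r hle
      rw [pvCountBits]
      have h : ¬ 0 < n := by omega
      rw [dif_neg h]
      have h0 : n.toNat = 0 := by omega
      rw [h0, pvPopc]
      simp
  | succ N ihN =>
      intro n r hle
      rw [pvCountBits]
      split_ifs with h
      · obtain ⟨m, rfl⟩ : ∃ m : Nat, n = (m : Int) := ⟨n.toNat, by omega⟩
        have hm : 0 < m := by exact_mod_cast h
        have h1 : (m : Int) - 1 = ((m - 1 : Nat) : Int) := by omega
        have h2 : Int.land (m : Int) ((m - 1 : Nat) : Int) = ((m &&& (m - 1) : Nat) : Int) := rfl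
        have hA : m &&& (m - 1) ≤ m - 1 := Nat.and_le_right
        have hmN : m ≤ N + 1 := by
          have := Int.toNat_natCast m; omega
        rw [h1, h2, ihN _ _ (by rw [Int.toNat_natCast]; omega)]
        rw [Int.toNat_natCast, Int.toNat_natCast]
        have h3 := pvKernighan m hm
        omega
      · have h0 : n.toNat = 0 := by omega
        rw [h0, pvPopc]
        simp

theorem pvCountBits_eq (n r : Int) : pvCountBits n r = r + ((pvPopc n.toNat : Nat) : Int) :=
  pvCountBits_eq_aux n.toNat n r (le_refl _)

-- B's loop xors the parity of the number of set bits of n into the accumulator bit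
theorem pvParityLoop_eq_aux : ∀ (N : Nat) (n : Int) (q : Nat), n.toNat ≤ N →
    pvParityLoop n ((q : Nat) : Int) = ((q ^^^ (pvPopc n.toNat % 2) : Nat) : Int) := by
  intro N
  induction N with
  | zero =>
      intro n q hle
      rw [pvParityLoop]
      have h : ¬ 0 < n := by omega
      rw [dif_neg h]
      have h0 : n.toNat = 0 := by omega
      rw [h0, pvPopc]
      simp
  | succ N ihN =>
      intro n q hle
      rw [pvParityLoop]
      split_ifs with h
      · obtain ⟨m, rfl⟩ : ∃ m : Nat, n = (m : Int) := ⟨n.toNat, by omega⟩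
        have hm : 0 < m := by exact_mod_cast h
        have h1 : Int.shiftRight (m : Int) 1 = ((m >>> 1 : Nat) : Int) := rfl
        have h2 : Int.xor ((q : Nat) : Int) (Int.land (m : Int) 1)
            = ((q ^^^ (m &&& 1) : Nat) : Int) := rfl
        have hsh : m >>> 1 = m / 2 := by simp [Nat.shiftRight_succ]
        have hmN : m ≤ N + 1 := by
          have := Int.toNat_natCast m; omega
        rw [h1, h2, ihN _ _ (by rw [Int.toNat_natCast]; omega)]
        rw [Int.toNat_natCast, Int.toNat_natCast, hsh, Nat.xor_assoc]
        congr 2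
        rw [Nat.and_one_is_mod]
        have hp : pvPopc m = m % 2 + pvPopc (m / 2) := by
          rw [pvPopc]; simp [Nat.pos_iff_ne_zero.mp hm]
        rcases Nat.mod_two_eq_zero_or_one m with hm2 | hm2 <;>
          rcases Nat.mod_two_eq_zero_or_one (pvPopc (m / 2)) with hq | hq <;>
            rw [hp, Nat.add_mod, hm2, hq] <;> decide
      · have h0 : n.toNat = 0 := by omega
        rw [h0, pvPopc]
        simp

theorem pvParityLoop_eq (n : Int) (q : Nat) :
    pvParityLoop n ((q : Nat) : Int) = ((q ^^^ (pvPopc n.toNat % 2) : Nat) : Int) :=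
  pvParityLoop_eq_aux n.toNat n q (le_refl _)

-- ===== VERDICT (by name: the statement is the Claim_ definition above) =====
theorem isOpen_spec : Claim_equal_isOpen := by
  unfold Claim_equal_isOpen
  intro x y magic _
  unfold Spec_isOpen isOpen isOpen_alt
  set n := magic + (x*x + 3*x + 2*x*y + y + y*y) with hn
  have hz : (0 : Int) = ((0 : Nat) : Int) := rfl
  rw [pvCountBits_eq, hz, pvParityLoop_eq, Nat.zero_xor]
  have hA : PySem.Int.mod (((0 : Nat) : Int) + ((pvPopc n.toNat : Nat) : Int)) 2
      = ((pvPopc n.toNat % 2 : Nat) : Int) := by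
    rw [PySem.Int.mod_eq_emod_of_pos]
    all_goals push_cast
    all_goals omega
  rw [hA]
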